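-- pv_equiv track=rewrite | github.com/Aryaa17/kg_Aryaa17_2021 | main.py | isMapping
-- ===== SOURCE A (Python) =====
-- def isMapping(string1, string2):
--     l1, l2 = len(string1), len(string2)
--     if l1 != l2:              # if two strings are of different length, returns false
--         return False
--     mapDict = {}              #stores all mappings into mapDict hash dictionary
--     for i in range(len(string1)):
--         if string1[i] in mapDict:
--             if mapDict[string1[i]] != string2[i]:          #checks whether there exists a one-to-one mapping or not
--                 return False
--         else:
--             mapDict[string1[i]] = string2[i]
--     return True
-- ===== SOURCE B (Python) =====
-- def isMapping(string1, string2):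
--     if len(string1) != len(string2):
--         return False
--     return len(set(zip(string1, string2))) == len(set(string1))
-- ===== Notes on version B (the rewrite author's own statement) =====
-- stated objective: simpler
-- what changed: Replaces the index loop with a per-character dict and early-exit consistency check by a single cardinality comparison: the number of distinct (source,target) pairs equals the number of distinct source characters exactly when the mapping is consistent.
import Mathlib
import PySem

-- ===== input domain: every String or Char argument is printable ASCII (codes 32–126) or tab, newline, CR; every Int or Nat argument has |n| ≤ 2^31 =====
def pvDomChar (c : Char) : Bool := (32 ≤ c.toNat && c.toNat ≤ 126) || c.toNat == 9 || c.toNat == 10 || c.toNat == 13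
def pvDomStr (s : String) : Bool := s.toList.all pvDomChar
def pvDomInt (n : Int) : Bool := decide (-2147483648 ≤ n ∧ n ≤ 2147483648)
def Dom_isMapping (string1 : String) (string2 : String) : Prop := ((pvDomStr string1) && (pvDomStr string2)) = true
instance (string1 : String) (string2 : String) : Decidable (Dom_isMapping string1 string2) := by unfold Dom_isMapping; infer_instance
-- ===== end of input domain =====

-- B replaces A's per-index dict loop with early exit by one cardinality comparison
-- (len(set(zip(s1,s2))) == len(set(s1))); objective: simpler. Same O(n) cost.

-- ===== PORT A =====
-- the 'for i in range(len(string1))' loop; the two strings are equal-length here, so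
-- iterating i with string1[i]/string2[i] is iterating the zipped character pairs
def isMappingLoop (d : PySem.Dict Char Char) : List (Char × Char) → Bool
  | [] => true
  | (a, b) :: rest =>
    match d.get? a with                      -- 'string1[i] in mapDict' / 'mapDict[string1[i]]'
    | some v => if v != b then false else isMappingLoop d rest
    | none => isMappingLoop (d.insert a b) rest

def isMapping (string1 : String) (string2 : String) : Bool :=
  if PySem.Str.len string1 ≠ PySem.Str.len string2 then false
  else isMappingLoop PySem.Dict.empty (string1.toList.zip string2.toList)

-- ===== PORT B =====
def isMapping_alt (string1 : String) (string2 : String) : Bool :=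
  if PySem.Str.len string1 ≠ PySem.Str.len string2 then false
  else (PySem.Set.ofList (string1.toList.zip string2.toList)).length
         == (PySem.Set.ofList string1.toList).length

-- ===== PRECONDITION & SPEC =====
def Spec_isMapping (string1 : String) (string2 : String) (out : Bool) : Prop := out = isMapping_alt string1 string2
instance (string1 : String) (string2 : String) (out : Bool) : Decidable (Spec_isMapping string1 string2 out) := by unfold Spec_isMapping; infer_instance

-- ===== CLAIM (what is proved, stated in full; the proofs are below) =====
def Claim_equal_isMapping : Prop := ∀ (string1 : String) (string2 : String), Dom_isMapping string1 string2 → Spec_isMapping string1 string2 (isMapping string1 string2)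

-- ===== LEMMAS AND PROOFS =====

-- consistency of a pair list: equal source chars always map to equal targets
def PairsFunctional (ps : List (Char × Char)) : Prop :=
  ∀ p ∈ ps, ∀ q ∈ ps, p.1 = q.1 → p.2 = q.2

-- A's loop characterisation: it returns true iff the pairs are mutually consistent
-- and consistent with the dict built so far
theorem isMappingLoop_eq_true_iff (ps : List (Char × Char)) :
    ∀ d : PySem.Dict Char Char,
      (isMappingLoop d ps = true ↔
        PairsFunctional ps ∧ ∀ p ∈ ps, ∀ v, d.get? p.1 = some v → v = p.2) := by
  induction ps with
  | nil =>
    intro d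
    simp [isMappingLoop, PairsFunctional]
  | cons hd tl ih =>
    intro d
    obtain ⟨a, b⟩ := hd
    rcases hv : d.get? a with _ | v
    · -- a not yet in the dict: insert (a, b)
      rw [show isMappingLoop d ((a, b) :: tl) = isMappingLoop (d.insert a b) tl by
            simp [isMappingLoop, hv]]
      rw [ih (d.insert a b)]
      constructor
      · rintro ⟨hf, hc⟩
        refine ⟨?_, ?_⟩
        · rintro p hp q hq h1
          rcases List.mem_cons.mp hp with rfl | hp <;>
            rcases List.mem_cons.mp hq with rfl | hq
          · rfl
          · exact hc q hq b (by rw [PySem.Dict.get?_insert, if_pos h1.symm])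
          · exact (hc p hp b (by rw [PySem.Dict.get?_insert, if_pos h1])).symm
          · exact hf p hp q hq h1
        · rintro p hp v hpv
          rcases List.mem_cons.mp hp with rfl | hp
          · simp only at hpv; rw [hv] at hpv; exact absurd hpv (by simp)
          · refine hc p hp v ?_
            rw [PySem.Dict.get?_insert]
            split
            · next h => rw [h] at hpv; rw [hv] at hpv; exact absurd hpv (by simp)
            · exact hpv
      · rintro ⟨hf, hc⟩
        refine ⟨?_, ?_⟩
        · intro p hp q hq h1
          exact hf p (List.mem_cons_of_mem _ hp) q (List.mem_cons_of_mem _ hq) h1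
        · intro p hp v hpv
          rw [PySem.Dict.get?_insert] at hpv
          by_cases hpa : p.1 = a
          · rw [if_pos hpa] at hpv
            have hvb' : v = b := by simpa using hpv.symm
            rw [hvb']
            exact (hf (a, b) List.mem_cons_self p (List.mem_cons_of_mem _ hp) hpa.symm)
          · rw [if_neg hpa] at hpv
            exact hc p (List.mem_cons_of_mem _ hp) v hpv
    · -- a already in the dict with value v
      by_cases hvb : v = b
      · rw [show isMappingLoop d ((a, b) :: tl) = isMappingLoop d tl by
              simp [isMappingLoop, hv, hvb]]
        rw [ih d]
        constructor
        · rintro ⟨hf, hc⟩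
          refine ⟨?_, ?_⟩
          · rintro p hp q hq h1
            rcases List.mem_cons.mp hp with rfl | hp <;>
              rcases List.mem_cons.mp hq with rfl | hq
            · rfl
            · exact hvb ▸ hc q hq v (by rw [← h1]; exact hv)
            · exact (hvb ▸ hc p hp v (by rw [h1]; exact hv)).symm
            · exact hf p hp q hq h1
          · rintro p hp w hpw
            rcases List.mem_cons.mp hp with rfl | hp
            · simp only at hpw ⊢; rw [hv] at hpw
              rw [← hvb]; exact (Option.some.inj hpw).symm ▸ rfl
            · exact hc p hp w hpw
        · rintro ⟨hf, hc⟩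
          exact ⟨fun p hp q hq h1 =>
              hf p (List.mem_cons_of_mem _ hp) q (List.mem_cons_of_mem _ hq) h1,
            fun p hp w hpw => hc p (List.mem_cons_of_mem _ hp) w hpw⟩
      · rw [show isMappingLoop d ((a, b) :: tl) = false by
              simp [isMappingLoop, hv, hvb]]
        exact iff_of_false Bool.false_ne_true
          (fun ⟨_, hc⟩ => hvb (hc (a, b) List.mem_cons_self v hv))

-- |set(xs)| as a finset cardinality
theorem ofList_length_toFinset {α : Type} [BEq α] [LawfulBEq α] [DecidableEq α] (xs : List α) :
    (PySem.Set.ofList xs).length = xs.toFinset.card := by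
  rw [← List.toFinset_card_of_nodup (PySem.Set.nodup_ofList xs)]
  congr 1
  ext x
  simp [PySem.Set.mem_ofList]

-- B's cardinality comparison characterisation
theorem card_eq_iff_functional (ps : List (Char × Char)) (xs : List Char)
    (h : ps.map Prod.fst = xs) :
    ((PySem.Set.ofList ps).length = (PySem.Set.ofList xs).length ↔
      PairsFunctional ps) := by
  subst h
  simp only [ofList_length_toFinset]
  rw [show (ps.map Prod.fst).toFinset = ps.toFinset.image Prod.fst by ext x; simp,
      eq_comm, Finset.card_image_iff]
  constructor
  · intro hinj p hp q hq h1
    have := hinj (by simpa using hp) (by simpa using hq) h1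
    rw [this]
  · intro hf p hp q hq h1
    have hp' : p ∈ ps := by simpa using hp
    have hq' : q ∈ ps := by simpa using hq
    exact Prod.ext h1 (hf p hp' q hq' h1)

-- ===== VERDICT (by name: the statement is the Claim_ definition above) =====
theorem isMapping_spec : Claim_equal_isMapping := by
  intro s1 s2 _
  unfold Spec_isMapping isMapping isMapping_alt
  by_cases hlen : PySem.Str.len s1 ≠ PySem.Str.len s2
  · rw [if_pos hlen, if_pos hlen]
  · rw [if_neg hlen, if_neg hlen]
    rw [not_not] at hlen
    have hlen' : s1.toList.length = s2.toList.length := by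
      have h := hlen
      simp only [PySem.Str.len_eq] at h
      rw [String.length_toList, String.length_toList]
      exact_mod_cast h
    have hfst : (s1.toList.zip s2.toList).map Prod.fst = s1.toList :=
      List.map_fst_zip (le_of_eq hlen')
    rw [Bool.eq_iff_iff, beq_iff_eq, isMappingLoop_eq_true_iff _ PySem.Dict.empty,
        ← card_eq_iff_functional _ _ hfst]
    constructor
    · exact fun h => h.1
    · intro h
      exact ⟨h, fun p _ v hv => by rw [PySem.Dict.get?_empty] at hv; cases hv⟩
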